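-- pv_equiv track=rewrite | github.com/OTOYO1020/ChatDev_Intermediate | WareHouse/B_258_DefaultOrganization_20250503180036/grid_processing.py | get_max_number
-- ===== SOURCE A (Python) =====
-- def get_max_number(grid, start_row, start_col, direction, n):
--     # Check if the starting position is out of bounds
--     if not (0 <= start_row < n and 0 <= start_col < n):
--         return 0  # Return 0 if starting position is invalid
--     collected_digits = []
--     row, col = start_row, start_col
--     # Check if the entire path remains within bounds
--     for step in range(n - 1):  # Iterate N-1 steps
--         if 0 <= row < n and 0 <= col < n:
--             collected_digits.append(str(grid[row][col]))
--             row += direction[0]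
--             col += direction[1]
--         else:
--             return 0  # Return 0 if out of bounds at any step
--     # Return the integer formed from the collected digits, or 0 if no digits were collected
--     return int(''.join(collected_digits)) if collected_digits else 0
-- ===== SOURCE B (Python) =====
-- def get_max_number(grid, start_row, start_col, direction, n):
--     if not (0 <= start_row < n and 0 <= start_col < n):
--         return 0
--     if n - 1 <= 0:
--         return 0
--     end_row = start_row + (n - 2) * direction[0]
--     end_col = start_col + (n - 2) * direction[1]
--     if not (0 <= end_row < n and 0 <= end_col < n):
--         return 0
--     digits = [str(grid[start_row + k * direction[0]][start_col + k * direction[1]])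
--               for k in range(n - 1)]
--     return int(''.join(digits))
-- ===== Notes on version B (the rewrite author's own statement) =====
-- stated objective: alternative
-- what changed: A walks the path checking bounds step-by-step with an early return inside the loop; B validates the whole path up front in closed form from its two endpoints (the coordinates are a linear progression, so endpoint bounds imply all intermediate bounds) and only then collects the cells in a single comprehension.
import Mathlib
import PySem

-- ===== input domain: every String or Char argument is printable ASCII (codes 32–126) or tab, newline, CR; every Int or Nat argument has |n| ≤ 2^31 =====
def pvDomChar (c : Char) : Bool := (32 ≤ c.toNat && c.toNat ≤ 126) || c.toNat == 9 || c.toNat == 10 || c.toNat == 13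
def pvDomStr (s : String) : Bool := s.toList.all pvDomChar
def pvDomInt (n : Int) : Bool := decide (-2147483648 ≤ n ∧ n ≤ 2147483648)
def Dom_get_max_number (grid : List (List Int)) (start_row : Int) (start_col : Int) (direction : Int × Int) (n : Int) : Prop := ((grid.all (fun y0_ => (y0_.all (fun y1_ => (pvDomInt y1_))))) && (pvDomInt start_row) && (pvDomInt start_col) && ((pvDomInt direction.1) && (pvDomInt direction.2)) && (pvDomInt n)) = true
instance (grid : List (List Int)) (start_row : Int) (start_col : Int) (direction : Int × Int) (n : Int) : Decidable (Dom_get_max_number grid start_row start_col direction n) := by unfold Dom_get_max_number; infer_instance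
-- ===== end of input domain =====

-- B replaces A's per-step bounds checking (with its early return) by a closed-form endpoint
-- validity test, then collects the path cells in one comprehension; alternative decomposition,
-- same asymptotic cost.

-- ===== PORT A =====

-- one grid cell grid[row][col]; total via getD — exact on inputs admitted by Pre_ (no IndexError)
def pvCellA (grid : List (List Int)) (row col : Int) : Int :=
  (PySem.List.pyGet? ((PySem.List.pyGet? grid row).getD []) col).getD 0

-- the 'for step in range(n-1)' loop of A: fuel = number of remaining iterations,
-- state (row, col, collected_digits); none = the early 'return 0' branch
def pvLoopA (grid : List (List Int)) (dr dc n : Int) :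
    Nat → Int → Int → List String → Option (List String)
  | 0, _, _, acc => some acc
  | Nat.succ m, row, col, acc =>
    if 0 ≤ row ∧ row < n ∧ 0 ≤ col ∧ col < n then
      pvLoopA grid dr dc n m (row + dr) (col + dc)
        (acc ++ [PySem.Int.toStr (pvCellA grid row col)])
    else none

def get_max_number (grid : List (List Int)) (start_row : Int) (start_col : Int) (direction : Int × Int) (n : Int) : Int :=
  if ¬ (0 ≤ start_row ∧ start_row < n ∧ 0 ≤ start_col ∧ start_col < n) then 0
  else
    match pvLoopA grid direction.1 direction.2 n (n - 1).toNat start_row start_col [] with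
    | none => 0
    | some collected =>
      if collected = [] then 0
      else (PySem.Int.ofStr? (PySem.Str.join "" collected)).getD 0

-- ===== PORT B =====

def get_max_number_alt (grid : List (List Int)) (start_row : Int) (start_col : Int) (direction : Int × Int) (n : Int) : Int :=
  if ¬ (0 ≤ start_row ∧ start_row < n ∧ 0 ≤ start_col ∧ start_col < n) then 0
  else if n - 1 ≤ 0 then 0
  else
    let end_row := start_row + (n - 2) * direction.1
    let end_col := start_col + (n - 2) * direction.2
    if ¬ (0 ≤ end_row ∧ end_row < n ∧ 0 ≤ end_col ∧ end_col < n) then 0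
    else
      let digits := (PySem.List.pyRange 0 (n - 1) 1).map (fun k =>
        PySem.Int.toStr ((PySem.List.pyGet? ((PySem.List.pyGet? grid (start_row + k * direction.1)).getD []) (start_col + k * direction.2)).getD 0))
      (PySem.Int.ofStr? (PySem.Str.join "" digits)).getD 0

-- ===== PRECONDITION & SPEC =====

-- Pre_ excludes exactly the inputs where Python A raises: an IndexError when a visited
-- in-[0,n) position lies outside the actual grid, or a ValueError when the full path is
-- walked and some cell after the first is negative (so ''.join is not an int literal).
-- number of steps k ≥ 0 for which coordinate a + k*d can stay in [0,n): closed-form upper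
-- bound on the loop iterations A actually executes (keeps Pre_ cheap to decide for large n)
def pvVis (a d n : Int) : Int :=
  if d = 0 then n - 1 else if 0 < d then (n - 1 - a) / d + 1 else a / (-d) + 1

def Pre_get_max_number (grid : List (List Int)) (start_row : Int) (start_col : Int) (direction : Int × Int) (n : Int) : Prop :=
  (0 ≤ start_row ∧ start_row < n ∧ 0 ≤ start_col ∧ start_col < n) →
    ((∀ k ∈ PySem.List.pyRange 0 (min (n - 1) (min (pvVis start_row direction.1 n) (pvVis start_col direction.2 n))) 1,
        (0 ≤ start_row + k * direction.1 ∧ start_row + k * direction.1 < n ∧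
         0 ≤ start_col + k * direction.2 ∧ start_col + k * direction.2 < n) →
        (start_row + k * direction.1 < (grid.length : Int) ∧
         start_col + k * direction.2 < ((((PySem.List.pyGet? grid (start_row + k * direction.1)).getD []) : List Int).length : Int)))
     ∧ ((2 ≤ n ∧ 0 ≤ start_row + (n - 2) * direction.1 ∧ start_row + (n - 2) * direction.1 < n ∧
               0 ≤ start_col + (n - 2) * direction.2 ∧ start_col + (n - 2) * direction.2 < n) →
        ∀ k ∈ PySem.List.pyRange 1 (n - 1) 1,
          0 ≤ pvCellA grid (start_row + k * direction.1) (start_col + k * direction.2)))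
instance (grid : List (List Int)) (start_row : Int) (start_col : Int) (direction : Int × Int) (n : Int) : Decidable (Pre_get_max_number grid start_row start_col direction n) := by unfold Pre_get_max_number; infer_instance

def pvWitness_get_max_number : List (List Int) × Int × Int × (Int × Int) × Int :=
  ([[1, 2, 3], [4, 5, 6], [7, 8, 9]], 0, 0, (1, 1), 3)

def Spec_get_max_number (grid : List (List Int)) (start_row : Int) (start_col : Int) (direction : Int × Int) (n : Int) (out : Int) : Prop := out = get_max_number_alt grid start_row start_col direction n
instance (grid : List (List Int)) (start_row : Int) (start_col : Int) (direction : Int × Int) (n : Int) (out : Int) : Decidable (Spec_get_max_number grid start_row start_col direction n out) := by unfold Spec_get_max_number; infer_instance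

-- ===== CLAIM (what is proved, stated in full; the proofs are below) =====
def Claim_equal_get_max_number : Prop := ∀ (grid : List (List Int)) (start_row : Int) (start_col : Int) (direction : Int × Int) (n : Int), Dom_get_max_number grid start_row start_col direction n → Pre_get_max_number grid start_row start_col direction n → Spec_get_max_number grid start_row start_col direction n (get_max_number grid start_row start_col direction n)

-- ===== LEMMAS AND PROOFS =====

-- a linear progression staying in [0,n) at k = 0 and k = n-2 stays in [0,n) in between
lemma pvConvex (a d n k : Int) (h0 : 0 ≤ a) (h0' : a < n)
    (he : 0 ≤ a + (n - 2) * d) (he' : a + (n - 2) * d < n)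
    (hk : 0 ≤ k) (hk' : k ≤ n - 2) : 0 ≤ a + k * d ∧ a + k * d < n := by
  by_cases hd : 0 ≤ d
  · have h1 : 0 ≤ k * d := mul_nonneg hk hd
    have h2 : k * d ≤ (n - 2) * d := mul_le_mul_of_nonneg_right hk' hd
    omega
  · push Not at hd
    have h1 : k * d ≤ 0 := mul_nonpos_of_nonneg_of_nonpos hk (le_of_lt hd)
    have h2 : (n - 2) * d ≤ k * d := mul_le_mul_of_nonpos_right hk' (le_of_lt hd)
    omega

-- if every visited position is in [0,n), A's loop collects exactly the cells along the path
lemma pvLoopA_some (grid : List (List Int)) (dr dc n : Int) :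
    ∀ (m : Nat) (row col : Int) (acc : List String),
      (∀ k : Nat, k < m →
        0 ≤ row + k * dr ∧ row + k * dr < n ∧ 0 ≤ col + k * dc ∧ col + k * dc < n) →
      pvLoopA grid dr dc n m row col acc =
        some (acc ++ (List.range m).map (fun (k : Nat) =>
          PySem.Int.toStr (pvCellA grid (row + (k : Int) * dr) (col + (k : Int) * dc)))) := by
  intro m
  induction m with
  | zero => intro row col acc _; simp [pvLoopA]
  | succ m ih =>
    intro row col acc h
    have h0 := h 0 (Nat.succ_pos m)
    simp only [Nat.cast_zero, zero_mul, add_zero] at h0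
    rw [pvLoopA, if_pos ⟨h0.1, h0.2.1, h0.2.2.1, h0.2.2.2⟩,
        ih (row + dr) (col + dc) _ (by
          intro k hk
          have := h (k + 1) (by omega)
          push_cast at this ⊢
          constructor
          · linarith [this.1]
          constructor
          · linarith [this.2.1]
          constructor
          · linarith [this.2.2.1]
          · linarith [this.2.2.2])]
    congr 1
    rw [List.range_succ_eq_map, List.map_cons, List.map_map]
    simp only [Nat.cast_zero, zero_mul, add_zero, List.append_assoc,
      List.singleton_append]
    congr 2
    refine List.map_congr_left ?_
    intro k _
    simp only [Function.comp_apply]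
    congr 2 <;> push_cast <;> ring

-- if some visited position (index < fuel) is out of [0,n), A's loop returns none
lemma pvLoopA_none (grid : List (List Int)) (dr dc n : Int) :
    ∀ (m : Nat) (row col : Int) (acc : List String) (j : Nat), j < m →
      ¬ (0 ≤ row + j * dr ∧ row + j * dr < n ∧ 0 ≤ col + j * dc ∧ col + j * dc < n) →
      pvLoopA grid dr dc n m row col acc = none := by
  intro m
  induction m with
  | zero => intro _ _ _ j hj; omega
  | succ m ih =>
    intro row col acc j hj hout
    by_cases hcur : 0 ≤ row ∧ row < n ∧ 0 ≤ col ∧ col < n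
    · rw [pvLoopA, if_pos hcur]
      have hj0 : j ≠ 0 := by
        intro h; subst h; simp only [Nat.cast_zero, zero_mul, add_zero] at hout
        exact hout hcur
      refine ih (row + dr) (col + dc) _ (j - 1) (by omega) ?_
      intro hc
      apply hout
      have hcast : ((j - 1 : Nat) : Int) = (j : Int) - 1 := by omega
      rw [hcast] at hc
      refine ⟨by linarith [hc.1], by linarith [hc.2.1], by linarith [hc.2.2.1], by linarith [hc.2.2.2]⟩
    · rw [pvLoopA, if_neg hcur]

-- B's comprehension over range(n-1) equals A's collected list when both start at (start_row, start_col)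
lemma pvRange_map_eq (sr sc dr dc : Int) (grid : List (List Int)) (n : Int) :
    (PySem.List.pyRange 0 (n - 1) 1).map (fun k =>
        PySem.Int.toStr ((PySem.List.pyGet? ((PySem.List.pyGet? grid (sr + k * dr)).getD []) (sc + k * dc)).getD 0))
      = (List.range (n - 1).toNat).map (fun (k : Nat) =>
          PySem.Int.toStr (pvCellA grid (sr + (k : Int) * dr) (sc + (k : Int) * dc))) := by
  rw [PySem.List.pyRange_one 0 (n - 1), List.map_map]
  have hlen : (n - 1 - 0).toNat = (n - 1).toNat := by norm_num
  rw [hlen]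
  refine List.map_congr_left ?_
  intro k _
  simp [pvCellA]

theorem pv_get_max_number_eq (grid : List (List Int)) (start_row : Int) (start_col : Int)
    (direction : Int × Int) (n : Int) :
    get_max_number grid start_row start_col direction n =
      get_max_number_alt grid start_row start_col direction n := by
  unfold get_max_number get_max_number_alt
  by_cases hstart : 0 ≤ start_row ∧ start_row < n ∧ 0 ≤ start_col ∧ start_col < n
  · rw [if_neg (not_not_intro hstart), if_neg (not_not_intro hstart)]
    by_cases hn : n - 1 ≤ 0
    · -- n = 1: empty loop, empty digits
      have : (n - 1).toNat = 0 := by omega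
      rw [this, if_pos hn]
      simp [pvLoopA]
    · rw [if_neg hn]
      simp only []
      by_cases hend : 0 ≤ start_row + (n - 2) * direction.1 ∧ start_row + (n - 2) * direction.1 < n ∧
          0 ≤ start_col + (n - 2) * direction.2 ∧ start_col + (n - 2) * direction.2 < n
      · -- full path in bounds: both produce the same digit string
        rw [if_neg (not_not_intro hend)]
        rw [pvLoopA_some grid direction.1 direction.2 n (n - 1).toNat start_row start_col []
            (by
              intro k hk
              have hk' : (k : Int) ≤ n - 2 := by omega
              have h1 := pvConvex start_row direction.1 n k hstart.1 hstart.2.1 hend.1 hend.2.1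
                (by positivity) hk'
              have h2 := pvConvex start_col direction.2 n k hstart.2.2.1 hstart.2.2.2 hend.2.2.1 hend.2.2.2
                (by positivity) hk'
              exact ⟨h1.1, h1.2, h2.1, h2.2⟩)]
        have hne : (List.range (n - 1).toNat).map (fun (k : Nat) =>
            PySem.Int.toStr (pvCellA grid (start_row + (k : Int) * direction.1) (start_col + (k : Int) * direction.2))) ≠ [] := by
          simp only [ne_eq, List.map_eq_nil_iff, List.range_eq_nil]
          omega
        simp only [List.nil_append]
        rw [if_neg hne, pvRange_map_eq start_row start_col direction.1 direction.2 grid n]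
      · -- endpoint out of bounds: A's loop hits it at step n-2 and returns none
        rw [if_pos hend]
        rw [pvLoopA_none grid direction.1 direction.2 n (n - 1).toNat start_row start_col [] (n - 2).toNat
            (by omega)
            (by
              have hcast : (((n - 2).toNat : Nat) : Int) = n - 2 := by omega
              rw [hcast]
              exact hend)]
  · rw [if_pos hstart, if_pos hstart]

-- ===== VERDICT (by name: the statement is the Claim_ definition above) =====
theorem get_max_number_spec : Claim_equal_get_max_number := by
  intro grid start_row start_col direction n _ _
  unfold Spec_get_max_number
  exact pv_get_max_number_eq grid start_row start_col direction n
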